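-- pv_equiv track=rewrite | github.com/naumovakotya/Python_Programming_School | HW_Final_task/functions.py | generate_route_variations
-- ===== SOURCE A (Python) =====
-- from itertools import permutations
--
-- def generate_route_variations(start, end, middle_points):
--     # Генерируем все возможные перестановки для middle_points
--     middle_permutations = permutations(middle_points)
--
--     # Создаем фиксированный список всех точек (начальная, промежуточные, конечная)
--     all_points = [start] + list(middle_points) + [end]
--
--     # Генерируем все возможные маршруты с учетом перестановок для middle_points
--     route_variations = [
--         [start] + list(permutation) + [end]
--         for permutation in middle_permutations
--     ]
--
--     return route_variations
-- ===== SOURCE B (Python) =====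
-- def generate_route_variations(start, end, middle_points):
--     # Hand-written recursive permutation generator: pick remaining elements
--     # in index order (same order as itertools.permutations), carry an
--     # accumulator, and emit the full route at each leaf.
--     routes = []
--
--     def rec(remaining, acc):
--         if not remaining:
--             routes.append([start] + acc + [end])
--             return
--         for i in range(len(remaining)):
--             rec(remaining[:i] + remaining[i + 1:], acc + [remaining[i]])
--
--     rec(list(middle_points), [])
--     return routes
-- ===== Notes on version B (the rewrite author's own statement) =====
-- stated objective: alternative
-- what changed: Replaced itertools.permutations + a list comprehension by a hand-written recursive generator that picks remaining elements in index order and emits complete routes at the leaves; the unused all_points list is dropped.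
import Mathlib
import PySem

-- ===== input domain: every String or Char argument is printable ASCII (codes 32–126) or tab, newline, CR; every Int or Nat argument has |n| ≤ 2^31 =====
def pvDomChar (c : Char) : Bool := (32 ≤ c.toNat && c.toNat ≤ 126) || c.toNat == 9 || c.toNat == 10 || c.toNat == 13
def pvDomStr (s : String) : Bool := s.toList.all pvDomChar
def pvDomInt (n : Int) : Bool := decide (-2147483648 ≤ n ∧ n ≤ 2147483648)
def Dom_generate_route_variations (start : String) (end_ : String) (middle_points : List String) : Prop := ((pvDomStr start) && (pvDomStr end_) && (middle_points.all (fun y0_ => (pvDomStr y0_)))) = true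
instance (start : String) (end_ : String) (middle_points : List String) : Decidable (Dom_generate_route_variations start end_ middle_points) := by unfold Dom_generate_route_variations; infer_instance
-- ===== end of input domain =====

-- B replaces itertools.permutations + comprehension by a hand-written recursive
-- permutation generator with an accumulator (alternative decomposition, same cost).

-- ===== PORT A =====
def generate_route_variations (start : String) (end_ : String) (middle_points : List String) : List (List String) :=
  -- middle_permutations = permutations(middle_points)
  let middle_permutations := PySem.List.permutations middle_points middle_points.length
  -- all_points = [start] + list(middle_points) + [end]  (unused in A, kept literally)
  let _all_points := [start] ++ middle_points ++ [end_]
  -- route_variations = [[start] + list(permutation) + [end] for permutation in middle_permutations]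
  middle_permutations.map (fun permutation => [start] ++ permutation ++ [end_])

-- ===== PORT B =====
-- rec(remaining, acc): emit [start]+acc+[end] at the leaf, otherwise pick each
-- remaining element in index order and recurse on the rest.
def pvRouteRec (start : String) (end_ : String) (remaining : List String) (acc : List String) : List (List String) :=
  if _h : remaining = [] then
    [[start] ++ acc ++ [end_]]
  else
    (List.range remaining.length).attach.flatMap (fun i =>
      pvRouteRec start end_ (remaining.eraseIdx i.val) (acc ++ [remaining.getD i.val ""]))
termination_by remaining.length
decreasing_by
  have hi : i.val < remaining.length := List.mem_range.mp i.property
  simp [List.length_eraseIdx, hi]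
  omega

def generate_route_variations_alt (start : String) (end_ : String) (middle_points : List String) : List (List String) :=
  pvRouteRec start end_ middle_points []

-- ===== PRECONDITION & SPEC =====
def Spec_generate_route_variations (start : String) (end_ : String) (middle_points : List String) (out : List (List String)) : Prop := out = generate_route_variations_alt start end_ middle_points
instance (start : String) (end_ : String) (middle_points : List String) (out : List (List String)) : Decidable (Spec_generate_route_variations start end_ middle_points out) := by unfold Spec_generate_route_variations; infer_instance

-- ===== CLAIM (what is proved, stated in full; the proofs are below) =====
def Claim_equal_generate_route_variations : Prop := ∀ (start : String) (end_ : String) (middle_points : List String), Dom_generate_route_variations start end_ middle_points → Spec_generate_route_variations start end_ middle_points (generate_route_variations start end_ middle_points)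

-- ===== LEMMAS AND PROOFS =====

-- The recursive generator with accumulator `acc` produces exactly the mapped
-- permutation list, with `acc` spliced in after `start`.
theorem pvRouteRec_eq (start end_ : String) :
    ∀ (n : Nat) (rem acc : List String), rem.length = n →
      pvRouteRec start end_ rem acc =
        (PySem.List.permutations rem rem.length).map
          (fun p => [start] ++ (acc ++ p) ++ [end_]) := by
  intro n
  induction n with
  | zero =>
    intro rem acc hlen
    have hnil : rem = [] := List.length_eq_zero_iff.mp hlen
    subst hnil
    simp [pvRouteRec]
  | succ k ih =>
    intro rem acc hlen
    have hne : rem ≠ [] := by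
      intro h; subst h; simp at hlen
    rw [pvRouteRec]
    rw [dif_neg hne]
    rw [hlen, PySem.List.permutations.eq_def]
    simp only [List.map_flatMap, List.flatMap_subtype, List.unattach_attach]
    rw [hlen]
    apply List.flatMap_congr
    intro i hi
    have hilt : i < rem.length := by rw [hlen]; exact List.mem_range.mp hi
    have hget : rem[i]? = some (rem.getD i "") := by
      simp [List.getD, List.getElem?_eq_getElem hilt]
    rw [hget]
    have herase : (rem.eraseIdx i).length = k := by
      simp [List.length_eraseIdx, hilt]; omega
    rw [ih (rem.eraseIdx i) (acc ++ [rem.getD i ""]) herase, herase]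
    simp [List.map_map, Function.comp_def]

-- ===== VERDICT (by name: the statement is the Claim_ definition above) =====
theorem generate_route_variations_spec : Claim_equal_generate_route_variations := by
  intro start end_ middle_points _hdom
  unfold Spec_generate_route_variations generate_route_variations generate_route_variations_alt
  rw [pvRouteRec_eq start end_ middle_points.length middle_points [] rfl]
  simp
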